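-- pv_equiv track=rewrite | github.com/Kitt-AI/parsetron | parsetron/parsetron.py | find_word_boundaries
-- ===== SOURCE A (Python) =====
-- def find_word_boundaries(string):
--     """
--     Given a string, such as "my lights are off", return a tuple::
--
--         0: a list containing all word boundaries in tuples
--         (start(inclusive), end(exclusive)):
--         [(0, 2), (3, 9), (10, 13), (14, 17)]
--         1: a set of all start positions: set[(0, 3, 10, 14)]
--         2: a set of all end positions: set[(2, 9, 13, 17)]
--
--     """
--     start, end, last_end = 0, 0, -1
--     boundaries = []
--     while end != -1:
--         end = string.find(" ", start)
--         if end != -1: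
--             boundaries.append((start, end))
--             last_end = end
--         start = last_end + 1
--     start, end = start, len(string)
--     if end > start:
--         boundaries.append((start, end))
--     if len(boundaries) > 0:
--         starts, ends = zip(*boundaries)
--         starts, ends = set(starts), set(ends)
--     else:
--         starts, ends = set(), set()
--     return boundaries, starts, ends
-- ===== SOURCE B (Python) =====
-- def find_word_boundaries(string):
--     """Let str.split on the space separator do the splitting; derive spans by
--     accumulating segment lengths; drop the final span when the last segment is empty."""
--     segs = string.split(" ")
--     boundaries = []
--     pos = 0
--     for seg in segs:
--         boundaries.append((pos, pos + len(seg)))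
--         pos += len(seg) + 1
--     if not segs[-1]:
--         boundaries.pop()
--     starts = {s for s, _ in boundaries}
--     ends = {e for _, e in boundaries}
--     return boundaries, starts, ends
-- ===== Notes on version B (the rewrite author's own statement) =====
-- stated objective: idiomatic
-- what changed: Instead of A's stateful while-loop of repeated string.find calls with last_end bookkeeping, B delegates the splitting to str.split on the space separator and reconstructs the spans by accumulating segment lengths, dropping the final span when the last segment is empty; sets come from comprehensions instead of zip(*)+set.
import Mathlib
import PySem

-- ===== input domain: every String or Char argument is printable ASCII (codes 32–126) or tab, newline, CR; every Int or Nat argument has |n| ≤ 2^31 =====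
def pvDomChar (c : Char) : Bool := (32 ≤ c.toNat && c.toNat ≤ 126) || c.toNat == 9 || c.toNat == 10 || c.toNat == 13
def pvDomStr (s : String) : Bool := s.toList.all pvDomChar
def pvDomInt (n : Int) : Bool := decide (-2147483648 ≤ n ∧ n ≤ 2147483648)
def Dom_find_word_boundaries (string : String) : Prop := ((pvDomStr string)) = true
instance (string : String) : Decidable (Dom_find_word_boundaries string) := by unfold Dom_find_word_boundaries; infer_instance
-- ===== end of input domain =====

-- B replaces A's while-loop of repeated string.find calls by str.split on the space separator
-- plus an accumulation of segment lengths into spans (objective: idiomatic).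

-- ===== PORT A =====
-- the while loop of A: end = string.find(" ", start) each round; the bound
-- argument h (start ≤ len) only makes the recursion total — at the loop head
-- start is always ≤ len, exactly as in the Python.
def fwbLoopA (l : List Char) (start : Nat) (last_end : Int) (bs : List (Int × Int))
    (h : start ≤ l.length) : List (Int × Int) × Int :=
  let e := PySem.Chars.findFrom l [' '] (start : Int) none
  if he : e = -1 then (bs, last_end + 1)
  else
    have hs := PySem.Chars.findFrom_natCast_spec l [' '] start h he
    have hlt : e.toNat < l.length := by
      have hp := hs.2.1
      have : l.drop e.toNat ≠ [] := by
        intro hnil; rw [hnil] at hp; exact (List.cons_ne_nil _ _) (List.prefix_nil.mp hp)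
      by_contra h'
      exact this (List.drop_eq_nil_of_le (by omega))
    have hse : start ≤ e.toNat := by
      have := hs.1; omega
    fwbLoopA l (e.toNat + 1) e (bs ++ [((start : Int), e)]) (by omega)
termination_by l.length - start
decreasing_by omega

def find_word_boundaries (string : String) : (List (Int × Int)) × List Int × List Int :=
  let l := string.toList
  let r := fwbLoopA l 0 (-1) [] (Nat.zero_le _)
  let start := r.2
  let boundaries :=
    if (PySem.Str.len string : Int) > start then r.1 ++ [(start, PySem.Str.len string)]
    else r.1
  if boundaries.length > 0 then
    (boundaries, PySem.Set.ofList (boundaries.map Prod.fst),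
      PySem.Set.ofList (boundaries.map Prod.snd))
  else (boundaries, [], [])

-- ===== PORT B =====
-- segs = string.split on the space separator; spans by accumulating segment lengths;
-- segs[-1] is List.pyGet? segs (-1); boundaries.pop() (drop the last element) is dropLast (exact: pop() removes the last element).
def find_word_boundaries_alt (string : String) : (List (Int × Int)) × List Int × List Int :=
  let segs := PySem.Chars.splitOn string.toList [' ']
  let r := segs.foldl
    (fun (st : List (Int × Int) × Int) seg =>
      (st.1 ++ [(st.2, st.2 + (seg.length : Int))], st.2 + (seg.length : Int) + 1))
    ([], 0)
  let boundaries := if PySem.List.pyGet? segs (-1) = some [] then r.1.dropLast else r.1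
  (boundaries, PySem.Set.ofList (boundaries.map Prod.fst),
    PySem.Set.ofList (boundaries.map Prod.snd))

-- ===== PRECONDITION & SPEC =====
def Spec_find_word_boundaries (string : String) (out : (List (Int × Int)) × List Int × List Int) : Prop := out = find_word_boundaries_alt string
instance (string : String) (out : (List (Int × Int)) × List Int × List Int) : Decidable (Spec_find_word_boundaries string out) := by unfold Spec_find_word_boundaries; infer_instance

-- ===== CLAIM (what is proved, stated in full; the proofs are below) =====
def Claim_equal_find_word_boundaries : Prop := ∀ (string : String), Dom_find_word_boundaries string → Spec_find_word_boundaries string (find_word_boundaries string)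

-- ===== LEMMAS AND PROOFS =====

-- recursive specification of splitting a char list on ' '
def segsB : List Char → List (List Char)
  | [] => [[]]
  | c :: t =>
    if c = ' ' then [] :: segsB t
    else match segsB t with
      | s :: rest => (c :: s) :: rest
      | [] => [[c]]

lemma segsB_ne_nil (l : List Char) : segsB l ≠ [] := by
  cases l with
  | nil => simp [segsB]
  | cons c t =>
    simp only [segsB]
    split
    · simp
    · split <;> simp

lemma go_spec (l : List Char) : ∀ (fuel : Nat), l.length < fuel → ∀ (cur : List Char) (acc : List (List Char)),
    PySem.Chars.splitOn.go [' '] fuel l cur acc =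
      acc.reverse ++ (match segsB l with
        | s :: rest => (cur.reverse ++ s) :: rest
        | [] => []) := by
  induction l with
  | nil =>
    intro fuel hf cur acc
    cases fuel with
    | zero => omega
    | succ f => simp [PySem.Chars.splitOn.go, segsB]
  | cons c t ih =>
    intro fuel hf cur acc
    cases fuel with
    | zero => omega
    | succ f =>
      rw [PySem.Chars.splitOn.go]
      by_cases hc : c = ' '
      · subst hc
        rw [if_pos (by simp [List.isPrefixOf])]
        simp only [List.length_singleton, List.drop_one, List.tail_cons]
        rw [ih f (by simp at hf; omega) [] (cur.reverse :: acc)]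
        simp [segsB]
        rcases h : segsB t with _ | ⟨s, rest⟩
        · exact absurd h (segsB_ne_nil t)
        · simp
      · rw [if_neg (by simp [List.isPrefixOf]; intro h; exact hc h.symm)]
        rw [ih f (by simp at hf; omega) (c :: cur) acc]
        rcases h : segsB t with _ | ⟨s, rest⟩
        · exact absurd h (segsB_ne_nil t)
        · simp [segsB, hc, h]

lemma splitOn_eq_segsB (l : List Char) : PySem.Chars.splitOn l [' '] = segsB l := by
  rw [PySem.Chars.splitOn]
  rw [go_spec l (l.length + 1) (by omega) [] []]
  simp
  rcases h : segsB l with _ | ⟨s, rest⟩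
  · exact absurd h (segsB_ne_nil l)
  · simp

lemma segsB_no_space (xs : List Char)
    (h : ∀ i, ∀ (hi : i < xs.length), xs[i] ≠ ' ') : segsB xs = [xs] := by
  induction xs with
  | nil => simp [segsB]
  | cons c t ih =>
    have hc : c ≠ ' ' := h 0 (by simp)
    have ht : segsB t = [t] := ih (fun i hi => h (i + 1) (by simpa using hi))
    simp [segsB, hc, ht]

lemma segsB_split (j : Nat) : ∀ (xs : List Char) (hj : j < xs.length),
    (∀ i, i < j → ∀ (hi : i < xs.length), xs[i] ≠ ' ') → xs[j] = ' ' →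
    segsB xs = xs.take j :: segsB (xs.drop (j + 1)) := by
  induction j with
  | zero =>
    intro xs hj _ hsp
    cases xs with
    | nil => simp at hj
    | cons c t =>
      simp at hsp
      simp [segsB, hsp]
  | succ j ih =>
    intro xs hj hns hsp
    cases xs with
    | nil => simp at hj
    | cons c t =>
      have hc : c ≠ ' ' := hns 0 (by omega) (by simp)
      have ht : segsB t = t.take j :: segsB (t.drop (j + 1)) := by
        apply ih t (by simpa using hj)
        · intro i hi hit
          exact hns (i + 1) (by omega) (by simpa using hit)
        · simpa using hsp
      simp [segsB, hc, ht]

-- spans of consecutive segments starting at a given offset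
def spansAll : List (List Char) → Int → List (Int × Int)
  | [], _ => []
  | s :: rest, off => (off, off + s.length) :: spansAll rest (off + s.length + 1)

lemma spansAll_ne_nil (ss : List (List Char)) (off : Int) (h : ss ≠ []) :
    spansAll ss off ≠ [] := by
  cases ss with
  | nil => exact absurd rfl h
  | cons s rest => simp [spansAll]

lemma foldB_spec (ss : List (List Char)) : ∀ (bs : List (Int × Int)) (off : Int),
    ss.foldl
      (fun (st : List (Int × Int) × Int) seg =>
        (st.1 ++ [(st.2, st.2 + (seg.length : Int))], st.2 + (seg.length : Int) + 1))
      (bs, off)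
    = (bs ++ spansAll ss off, off + ((ss.map (fun s => (s.length : Int) + 1)).sum)) := by
  induction ss with
  | nil => intro bs off; simp [spansAll]
  | cons s rest ih =>
    intro bs off
    simp only [List.foldl_cons, spansAll, ih, List.map_cons, List.sum_cons, Prod.mk.injEq]
    exact ⟨by simp, by ring⟩

lemma spansAll_getLast (ss : List (List Char)) : ∀ (off : Int), ss ≠ [] →
    ∃ (p : Int) (seg : List Char), ss.getLast? = some seg ∧
      (spansAll ss off).getLast? = some (p, p + (seg.length : Int)) := by
  induction ss with
  | nil => intro off h; exact absurd rfl h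
  | cons s rest ih =>
    intro off _
    cases rest with
    | nil => exact ⟨off, s, by simp [spansAll]⟩
    | cons a b =>
      obtain ⟨p, seg, hseg, hp⟩ := ih (off + s.length + 1) (by simp)
      exact ⟨p, seg, by simpa using hseg, by simpa [spansAll] using hp⟩

-- helper facts about Chars.find on the tail (used by the main invariant)
lemma prefix_singleton_iff (c : Char) (xs : List Char) :
    [c] <+: xs ↔ ∃ (h : 0 < xs.length), xs[0] = c := by
  cases xs with
  | nil => simp
  | cons y t =>
    constructor
    · intro h
      rcases (List.cons_prefix_cons.mp h) with ⟨rfl, -⟩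
      exact ⟨by simp, rfl⟩
    · rintro ⟨-, rfl⟩
      exact List.cons_prefix_cons.mpr ⟨rfl, List.nil_prefix⟩

lemma no_space_of_find_neg (l : List Char) (k : Nat)
    (hf : PySem.Chars.find (l.drop k) [' '] = -1) :
    ∀ j, k ≤ j → ∀ (h : j < l.length), l[j] ≠ ' ' := by
  intro j hkj h hsp
  have : [' '] <+: (l.drop k).drop (j - k) := by
    rw [prefix_singleton_iff]
    refine ⟨by simp; omega, ?_⟩
    simp only [List.getElem_drop]
    convert hsp using 2
    omega
  have hinf : [' '] <:+: l.drop k := this.isInfix.trans (List.drop_suffix _ _).isInfix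
  exact (PySem.Chars.find_eq_neg_one_iff _ _).mp hf hinf

lemma space_prefix_drop (l : List Char) (k j : Nat) (hkj : k ≤ j) (h : j < l.length)
    (hsp : l[j] = ' ') : [' '] <+: (l.drop k).drop (j - k) := by
  rw [prefix_singleton_iff]
  refine ⟨by simp; omega, ?_⟩
  simp only [List.getElem_drop]
  convert hsp using 2
  omega

lemma find_pos_spec (l : List Char) (k : Nat)
    (hf : PySem.Chars.find (l.drop k) [' '] ≠ -1) :
    0 ≤ PySem.Chars.find (l.drop k) [' '] ∧
    ∃ (h : k + (PySem.Chars.find (l.drop k) [' ']).toNat < l.length),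
      l[k + (PySem.Chars.find (l.drop k) [' ']).toNat] = ' ' ∧
      ∀ j, k ≤ j → j < k + (PySem.Chars.find (l.drop k) [' ']).toNat →
        ∀ (hj : j < l.length), l[j] ≠ ' ' := by
  have h0 : 0 ≤ PySem.Chars.find (l.drop k) [' '] := by
    have := PySem.Chars.neg_one_le_find (l.drop k) [' ']
    omega
  obtain ⟨hpre, hmin⟩ := PySem.Chars.find_spec h0
  set f := (PySem.Chars.find (l.drop k) [' ']).toNat with hfdef
  rw [List.drop_drop] at hpre
  rw [prefix_singleton_iff] at hpre
  obtain ⟨hlen, hget⟩ := hpre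
  have hlt : k + f < l.length := by simpa using hlen
  refine ⟨h0, by omega, ?_, ?_⟩
  · rw [List.getElem_drop] at hget
    convert hget using 2
  · intro j hkj hjf hj hsp
    have := space_prefix_drop l k j hkj hj hsp
    exact hmin (j - k) (by omega) this

-- MAIN INVARIANT: A's loop result is all but the last of the segment spans,
-- and the last span runs from the loop's final start to the end of the string.
lemma fwbLoopA_eq_segs (l : List Char) (start : Nat) (h : start ≤ l.length)
    (bs : List (Int × Int)) :
    ∃ p : Int,
      fwbLoopA l start ((start : Int) - 1) bs h
        = (bs ++ (spansAll (segsB (l.drop start)) (start : Int)).dropLast, p) ∧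
      (spansAll (segsB (l.drop start)) (start : Int)).getLast? = some (p, (l.length : Int)) := by
  rw [fwbLoopA]
  by_cases hf : PySem.Chars.find (l.drop start) [' '] = -1
  · have he : PySem.Chars.findFrom l [' '] (start : Int) none = -1 := by
      rw [PySem.Chars.findFrom_natCast l [' '] start h, if_pos hf]
    rw [dif_pos he]
    have hseg : segsB (l.drop start) = [l.drop start] := by
      apply segsB_no_space
      intro i hi
      have := no_space_of_find_neg l start hf (start + i) (by omega) (by simp at hi; omega)
      simpa using this
    refine ⟨(start : Int), ?_, ?_⟩
    · simp [hseg, spansAll]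
      try omega
    · simp [hseg, spansAll]
      try omega
  · obtain ⟨h0, hlt, hsp, hminsp⟩ := find_pos_spec l start hf
    have he : PySem.Chars.findFrom l [' '] (start : Int) none =
        (start : Int) + PySem.Chars.find (l.drop start) [' '] := by
      rw [PySem.Chars.findFrom_natCast l [' '] start h, if_neg hf]
    have hene : PySem.Chars.findFrom l [' '] (start : Int) none ≠ -1 := by omega
    rw [dif_neg hene]
    set j := (PySem.Chars.find (l.drop start) [' ']).toNat with hj
    have hE : PySem.Chars.findFrom l [' '] (start : Int) none = ((start + j : Nat) : Int) := by
      push_cast; omega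
    have hseg : segsB (l.drop start) =
        (l.drop start).take j :: segsB (l.drop (start + j + 1)) := by
      have := segsB_split j (l.drop start) (by simp; omega)
        (fun i hij hi => by
          have := hminsp (start + i) (by omega) (by omega) (by simp at hi; omega)
          simpa using this)
        (by simpa [List.getElem_drop] using hsp)
      rw [this, List.drop_drop]
      congr 2
      try omega
    have htk : ((l.drop start).take j).length = j := by simp; omega
    obtain ⟨p, hrec, hlast⟩ := fwbLoopA_eq_segs l (start + j + 1) (by omega) (bs ++ [((start : Int), ((start + j : Nat) : Int))])
    refine ⟨p, ?_, ?_⟩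
    · simp only [hE, Int.toNat_natCast]
      have harg : ((start + j + 1 : Nat) : Int) - 1 = ((start + j : Nat) : Int) := by push_cast; ring
      rw [harg] at hrec
      rw [hrec]
      have hne : spansAll (segsB (l.drop (start + j + 1))) (((start : Int) + j) + 1) ≠ [] :=
        spansAll_ne_nil _ _ (segsB_ne_nil _)
      rw [hseg, spansAll, htk]
      rw [List.dropLast_cons_of_ne_nil hne]
      simp only [List.append_assoc, List.singleton_append, Prod.mk.injEq]
      refine ⟨?_, trivial⟩
      push_cast
      rfl
    · rw [hseg, spansAll, htk]
      have hc : ((start + j + 1 : Nat) : Int) = ((start : Int) + (j : Int)) + 1 := by push_cast; ring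
      rw [hc] at hlast
      cases hsp' : spansAll (segsB (l.drop (start + j + 1))) (((start : Int) + (j : Int)) + 1) with
      | nil => exact absurd hsp' (spansAll_ne_nil _ _ (segsB_ne_nil _))
      | cons x xs =>
        rw [hsp'] at hlast
        rw [List.getLast?_cons_cons]
        exact hlast
termination_by l.length - start
decreasing_by omega

lemma pyGet_neg_one (ss : List (List Char)) (h : ss ≠ []) :
    PySem.List.pyGet? ss (-1) = ss.getLast? := by
  have hl : 0 < ss.length := List.length_pos_iff.mpr h
  rw [PySem.List.pyGet?, PySem.List.pyIdx?]
  rw [if_neg (by omega), if_pos (by omega)]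
  rw [List.getLast?_eq_getElem?]
  simp

-- ===== VERDICT (by name: the statement is the Claim_ definition above) =====
theorem find_word_boundaries_spec : Claim_equal_find_word_boundaries := by
  intro string _
  unfold Spec_find_word_boundaries
  dsimp only [find_word_boundaries, find_word_boundaries_alt]
  set l := string.toList with hl
  obtain ⟨p, hloop, hlast⟩ := fwbLoopA_eq_segs l 0 (Nat.zero_le _) []
  simp only [List.drop_zero, Nat.cast_zero] at hloop hlast
  rw [show ((0 : Int) - 1) = (-1 : Int) by ring] at hloop
  rw [hloop, splitOn_eq_segsB, foldB_spec]
  set ss := segsB l with hss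
  have hssne : ss ≠ [] := segsB_ne_nil l
  obtain ⟨q, seg, hseg, hq⟩ := spansAll_getLast ss 0 hssne
  have hpq : p = q ∧ (l.length : Int) = q + (seg.length : Int) := by
    have := hlast.symm.trans hq
    simpa [Prod.ext_iff] using this
  obtain ⟨rfl, hlen⟩ := hpq
  rw [pyGet_neg_one ss hssne, hseg]
  have hlen' : PySem.Str.len string = (l.length : Int) := by
    rw [PySem.Str.len, hl]
  have hne := spansAll_ne_nil ss 0 hssne
  have hsplit : spansAll ss 0 = (spansAll ss 0).dropLast ++ [(p, (l.length : Int))] := by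
    conv_lhs => rw [← List.dropLast_append_getLast hne]
    congr 1
    have h1 := List.getLast?_eq_some_getLast hne
    have h2 : (spansAll ss 0).getLast hne = (p, (l.length : Int)) := by
      have := h1.symm.trans hlast
      simpa using this
    simp [h2]
  by_cases hempty : seg = []
  · -- last segment empty: A skips the tail span, B pops the last span
    subst hempty
    have hple : ¬ (PySem.Str.len string > p) := by
      rw [hlen']
      simp only [List.length_nil, Nat.cast_zero, add_zero] at hlen
      omega
    rw [if_neg hple, if_pos rfl]
    simp only [List.nil_append]
    by_cases hnil : (spansAll ss 0).dropLast.length > 0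
    · rw [if_pos hnil]
    · rw [if_neg hnil]
      have hdl : (spansAll ss 0).dropLast = [] := by
        cases h' : (spansAll ss 0).dropLast with
        | nil => rfl
        | cons a b => rw [h'] at hnil; simp at hnil
      rw [hdl]
      simp [PySem.Set.ofList]
  · -- last segment nonempty: A appends the tail span, B keeps all spans
    have hpgt : PySem.Str.len string > p := by
      rw [hlen', hlen]
      have : 0 < seg.length := List.length_pos_iff.mpr hempty
      omega
    rw [if_pos hpgt]
    rw [if_neg (show ¬ ((some seg : Option (List Char)) = some []) from
      fun hcon => hempty (Option.some.inj hcon))]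
    have hfull : ([] : List (Int × Int)) ++ (spansAll ss 0).dropLast ++ [(p, PySem.Str.len string)]
        = ([] : List (Int × Int)) ++ spansAll ss 0 := by
      rw [hlen']
      simp only [List.nil_append]
      exact hsplit.symm
    rw [hfull]
    rw [if_pos (show (([] : List (Int × Int)) ++ spansAll ss 0).length > 0 from by
      simpa using List.length_pos_iff.mpr hne)]
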